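-- pv_equiv track=rewrite | github.com/mohammadkarbalaee/DSA-SBU-Fall2021 | quera-problems/series6/python/second.py | speacial_sort
-- ===== SOURCE A (Python) =====
-- from collections import Counter
--
-- def speacial_sort(first_array, second_array):
--     sorted_array = []
--     f = Counter(first_array)
--     for e in second_array:
--         sorted_array.extend([e] * f[e])
--         f[e] = 0
--     remaining = list(sorted(filter(lambda x: f[x] != 0, f.keys())))
--     for e in remaining:
--         sorted_array.extend([e] * f[e])
--     return sorted_array
-- ===== SOURCE B (Python) =====
-- def speacial_sort(first_array, second_array):
--     rank = {}
--     for i, e in enumerate(second_array):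
--         if e not in rank:
--             rank[e] = i
--     return sorted(first_array, key=lambda x: (0, rank[x]) if x in rank else (1, x))
-- ===== Notes on version B (the rewrite author's own statement) =====
-- stated objective: idiomatic
-- what changed: A counts with a Counter, emits grouped blocks while zeroing counts, then appends the sorted leftovers; B builds a first-occurrence rank dict and does one stable sort of first_array with the key (0, rank[x]) for elements of second_array and (1, x) for the rest.
import Mathlib
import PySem

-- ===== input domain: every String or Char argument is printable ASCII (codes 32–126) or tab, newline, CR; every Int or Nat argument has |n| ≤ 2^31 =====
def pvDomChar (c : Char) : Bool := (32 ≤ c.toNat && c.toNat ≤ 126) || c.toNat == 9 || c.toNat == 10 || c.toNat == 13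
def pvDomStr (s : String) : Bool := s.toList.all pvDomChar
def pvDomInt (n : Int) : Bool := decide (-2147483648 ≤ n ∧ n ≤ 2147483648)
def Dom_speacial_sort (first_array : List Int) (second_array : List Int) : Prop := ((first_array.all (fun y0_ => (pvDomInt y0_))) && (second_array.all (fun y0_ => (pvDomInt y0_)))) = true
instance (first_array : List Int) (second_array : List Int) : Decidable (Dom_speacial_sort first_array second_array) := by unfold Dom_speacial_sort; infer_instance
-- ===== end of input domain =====

-- B replaces A's Counter-and-extend grouping by one key-driven stable sort (first-occurrence rank
-- in second_array for known elements, the value itself for the rest); same return value, more idiomatic.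

-- ===== PORT A =====
def speacial_sort (first_array : List Int) (second_array : List Int) : List Int :=
  -- f = Counter(first_array); loop 'for e in second_array: extend([e]*f[e]); f[e]=0' carries (sorted_array, f)
  let f := PySem.Dict.counter first_array
  let st := second_array.foldl
      (fun (p : List Int × PySem.Dict Int Int) e =>
        (p.1 ++ List.replicate (p.2.getD e 0).toNat e, p.2.insert e 0)) ([], f)
  -- remaining = list(sorted(filter(lambda x: f[x] != 0, f.keys())))
  let remaining := PySem.List.sorted
      (st.2.keys.filter (fun x => decide (st.2.getD x 0 ≠ 0))) (fun x => x) false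
  -- for e in remaining: extend([e]*f[e])
  remaining.foldl (fun acc e => acc ++ List.replicate (st.2.getD e 0).toNat e) st.1

-- ===== PORT B =====
def speacial_sort_alt (first_array : List Int) (second_array : List Int) : List Int :=
  -- rank = {}; for i, e in enumerate(second_array): if e not in rank: rank[e] = i
  let rank := (PySem.List.enumerate second_array).foldl
      (fun (d : PySem.Dict Int Int) p => if d.contains p.2 then d else d.insert p.2 p.1)
      PySem.Dict.empty
  -- sorted(first_array, key=lambda x: (0, rank[x]) if x in rank else (1, x))
  PySem.List.sorted2 first_array
    (fun x => if rank.contains x then (0 : Int) else 1)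
    (fun x => if rank.contains x then rank.getD x 0 else x) false

-- ===== PRECONDITION & SPEC =====
def Spec_speacial_sort (first_array : List Int) (second_array : List Int) (out : List Int) : Prop := out = speacial_sort_alt first_array second_array
instance (first_array : List Int) (second_array : List Int) (out : List Int) : Decidable (Spec_speacial_sort first_array second_array out) := by unfold Spec_speacial_sort; infer_instance

-- ===== CLAIM (what is proved, stated in full; the proofs are below) =====
def Claim_equal_speacial_sort : Prop := ∀ (first_array : List Int) (second_array : List Int), Dom_speacial_sort first_array second_array → Spec_speacial_sort first_array second_array (speacial_sort first_array second_array)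

-- ===== LEMMAS AND PROOFS =====

-- B's rank dictionary, as a standalone term (definitionally the `let rank` of the port of B).
def pvRank (second_array : List Int) : PySem.Dict Int Int :=
  (PySem.List.enumerate second_array).foldl
    (fun (d : PySem.Dict Int Int) p => if d.contains p.2 then d else d.insert p.2 p.1)
    PySem.Dict.empty

-- B's sort key, as a single value in the lexicographic order on Int × Int.
def pvK (rank : PySem.Dict Int Int) (x : Int) : Int ×ₗ Int :=
  toLex (if rank.contains x then (0 : Int) else 1,
         if rank.contains x then rank.getD x 0 else x)

-- Abstract form of A's first loop: emit a block of g e copies of e, then zero g at e.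
def pvGrp (g : Int → Int) : List Int → List Int
  | [] => []
  | e :: t => List.replicate (g e).toNat e ++ pvGrp (fun v => if v = e then 0 else g v) t

-- First-occurrence dedup (proof-side only).
def pvFD : List Int → List Int
  | [] => []
  | e :: t => e :: pvFD (t.filter (fun v => decide (v ≠ e)))
  termination_by l => l.length
  decreasing_by simpa using List.length_filter_le _ t.attach

-- A's first loop splits into the emitted list and the zeroing fold.
theorem pvLoopA (ss : List Int) (d : PySem.Dict Int Int) (acc : List Int) :
    ss.foldl (fun (p : List Int × PySem.Dict Int Int) e =>
        (p.1 ++ List.replicate (p.2.getD e 0).toNat e, p.2.insert e 0)) (acc, d)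
    = (acc ++ pvGrp (fun v => d.getD v 0) ss,
       ss.foldl (fun d e => d.insert e 0) d) := by
  induction ss generalizing d acc with
  | nil => simp [pvGrp]
  | cons e t ih =>
    simp only [List.foldl_cons, pvGrp, ih]
    have : (fun v => (d.insert e 0).getD v 0) = (fun v => if v = e then 0 else d.getD v 0) := by
      funext v; rw [PySem.Dict.getD_insert]
    rw [this, List.append_assoc]

theorem pvZeroFold_getD (ss : List Int) (d : PySem.Dict Int Int) (v : Int) :
    (ss.foldl (fun d e => d.insert e 0) d).getD v 0
    = if v ∈ ss then 0 else d.getD v 0 := by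
  induction ss generalizing d with
  | nil => simp
  | cons e t ih =>
    simp only [List.foldl_cons, ih, PySem.Dict.getD_insert, List.mem_cons]
    by_cases hv : v = e <;> by_cases hm : v ∈ t <;> simp [hv, hm]

theorem pvGrp_mem {g : Int → Int} {ss : List Int} {x : Int} (h : x ∈ pvGrp g ss) : x ∈ ss := by
  induction ss generalizing g with
  | nil => simp [pvGrp] at h
  | cons e t ih =>
    simp only [pvGrp, List.mem_append, List.mem_cons] at h ⊢
    rcases h with h | h
    · exact Or.inl (List.eq_of_mem_replicate h)
    · exact Or.inr (ih h)

theorem pvGrp_count (g : Int → Int) (ss : List Int) (v : Int) :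
    (pvGrp g ss).count v = if v ∈ ss then (g v).toNat else 0 := by
  induction ss generalizing g with
  | nil => simp [pvGrp]
  | cons e t ih =>
    simp only [pvGrp, List.count_append, ih, List.count_replicate, List.mem_cons]
    by_cases hv : v = e
    · subst hv; by_cases hm : v ∈ t <;> simp [hm]
    · by_cases hm : v ∈ t <;> simp [hv, hm, Ne.symm hv]

theorem pvGrp_pairwise {R : Int → Int → Prop} {g : Int → Int} {ss : List Int}
    (hrefl : ∀ a ∈ ss, R a a) (hp : ss.Pairwise R) : (pvGrp g ss).Pairwise R := by
  induction ss generalizing g with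
  | nil => exact List.Pairwise.nil
  | cons e t ih =>
    rw [List.pairwise_cons] at hp
    refine (List.pairwise_append).2 ⟨?_, ?_, ?_⟩
    · exact (List.pairwise_replicate).2 (Or.inr (hrefl e (by simp)))
    · exact ih (fun a ha => hrefl a (by simp [ha])) hp.2
    · intro x hx y hy
      rw [List.eq_of_mem_replicate hx]
      exact hp.1 y (pvGrp_mem hy)

theorem pvGrp_filter_of_zero {g : Int → Int} {e : Int} (he : g e = 0) (t : List Int) :
    pvGrp g t = pvGrp g (t.filter (fun v => decide (v ≠ e))) := by
  induction t generalizing g with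
  | nil => rfl
  | cons x t' ih =>
    by_cases hx : x = e
    · subst hx
      have hz : (fun v => if v = x then 0 else g v) = g := by
        funext v; by_cases hv : v = x <;> simp [hv, he]
      simp only [pvGrp, he, List.filter_cons]
      simp [hz, ih he]
    · have he' : (fun v => if v = x then 0 else g v) e = 0 := by simp [he, Ne.symm hx]
      rw [List.filter_cons_of_pos (by simp [hx])]
      simp only [pvGrp]
      rw [ih he']

theorem pvFD_cons (e : Int) (t : List Int) :
    pvFD (e :: t) = e :: pvFD (t.filter (fun v => decide (v ≠ e))) := by
  rw [pvFD]

theorem pvFD_mem (ss : List Int) (x : Int) : x ∈ pvFD ss ↔ x ∈ ss := by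
  induction hn : ss.length using Nat.strong_induction_on generalizing ss with
  | _ n ih =>
  cases ss with
  | nil => simp [pvFD]
  | cons e t =>
    subst hn
    rw [pvFD_cons]
    have iht := ih _ (by simpa using Nat.lt_succ_of_le (List.length_filter_le _ t))
      (t.filter (fun v => decide (v ≠ e))) rfl
    simp only [List.mem_cons, iht, List.mem_filter]
    by_cases hx : x = e <;> simp [hx]

theorem pvGrp_eq_pvGrp_pvFD (g : Int → Int) (ss : List Int) :
    pvGrp g ss = pvGrp g (pvFD ss) := by
  induction hn : ss.length using Nat.strong_induction_on generalizing ss g with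
  | _ n ih =>
  cases ss with
  | nil => rw [pvFD]
  | cons e t =>
    subst hn
    rw [pvFD_cons]
    simp only [pvGrp]
    rw [pvGrp_filter_of_zero (g := fun v => if v = e then 0 else g v) (e := e) (by simp) t,
      ih _ (by simpa using Nat.lt_succ_of_le (List.length_filter_le _ t)) _ _ rfl]

theorem pvIdxOf_filter_mono {t : List Int} {p : Int → Bool} {a b : Int}
    (ha : a ∈ t.filter p) (hb : b ∈ t.filter p)
    (h : (t.filter p).idxOf a < (t.filter p).idxOf b) : t.idxOf a < t.idxOf b := by
  induction t with
  | nil => simp at ha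
  | cons x t' ih =>
    by_cases hpx : p x
    · rw [List.filter_cons_of_pos hpx] at ha hb h
      by_cases hax : a = x
      · subst hax
        have hba : b ≠ a := by
          intro hh; subst hh; simp at h
        simp [List.idxOf_cons_self, List.idxOf_cons_ne _ (by exact fun hh => hba hh.symm)]
      · have hbx : b ≠ x := by
          intro hh; subst hh
          rw [List.idxOf_cons_self] at h
          omega
        rw [List.idxOf_cons_ne _ (fun hh => hax hh.symm), List.idxOf_cons_ne _ (fun hh => hbx hh.symm)] at h
        have ha' : a ∈ t'.filter p := by
          rcases List.mem_cons.1 ha with hh | hh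
          · exact absurd hh hax
          · exact hh
        have hb' : b ∈ t'.filter p := by
          rcases List.mem_cons.1 hb with hh | hh
          · exact absurd hh hbx
          · exact hh
        rw [List.idxOf_cons_ne _ (fun hh => hax hh.symm), List.idxOf_cons_ne _ (fun hh => hbx hh.symm)]
        have := ih ha' hb' (by omega)
        omega
    · rw [List.filter_cons_of_neg hpx] at ha hb h
      have hax : a ≠ x := by
        intro hh; subst hh; exact hpx (List.of_mem_filter ha)
      have hbx : b ≠ x := by
        intro hh; subst hh; exact hpx (List.of_mem_filter hb)
      rw [List.idxOf_cons_ne _ (fun hh => hax hh.symm), List.idxOf_cons_ne _ (fun hh => hbx hh.symm)]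
      have := ih ha hb h
      omega

theorem pvFD_pairwise_idxOf (ss : List Int) :
    (pvFD ss).Pairwise (fun a b => ss.idxOf a < ss.idxOf b) := by
  induction hn : ss.length using Nat.strong_induction_on generalizing ss with
  | _ n ihn =>
  cases ss with
  | nil => rw [pvFD]; exact List.Pairwise.nil
  | cons e t =>
    subst hn
    have ih := ihn _ (by simpa using Nat.lt_succ_of_le (List.length_filter_le _ t))
      (t.filter (fun v => decide (v ≠ e))) rfl
    rw [pvFD_cons, List.pairwise_cons]
    constructor
    · intro b hb
      have hbm := (pvFD_mem _ b).1 hb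
      have hbt : b ∈ t := (List.mem_filter.1 hbm).1
      have hbe : b ≠ e := by simpa using (List.mem_filter.1 hbm).2
      rw [List.idxOf_cons_self, List.idxOf_cons_ne _ (fun hh => hbe hh.symm)]
      omega
    · refine ih.imp_of_mem ?_
      intro a b ha hb hlt
      have ha' := (pvFD_mem _ a).1 ha
      have hb' := (pvFD_mem _ b).1 hb
      have hae : a ≠ e := by simpa using (List.mem_filter.1 ha').2
      have hbe : b ≠ e := by simpa using (List.mem_filter.1 hb').2
      rw [List.idxOf_cons_ne _ (fun hh => hae hh.symm), List.idxOf_cons_ne _ (fun hh => hbe hh.symm)]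
      have := pvIdxOf_filter_mono ha' hb' hlt
      omega

theorem pvRankLoop_get? (ss : List Int) (s : Int) (d : PySem.Dict Int Int) (v : Int) :
    ((PySem.List.enumerate ss s).foldl
        (fun (d : PySem.Dict Int Int) p => if d.contains p.2 then d else d.insert p.2 p.1) d).get? v
    = if d.contains v then d.get? v
      else if v ∈ ss then some (s + (ss.idxOf v : Int)) else d.get? v := by
  induction ss generalizing s d with
  | nil => simp [PySem.List.enumerate]
  | cons e t ih =>
    rw [PySem.List.enumerate_cons, List.foldl_cons]
    by_cases hc : d.contains e
    · simp only [hc, if_true]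
      rw [ih]
      by_cases hv : v = e
      · subst hv; simp [hc]
      · by_cases hcv : d.contains v
        · simp [hcv]
        · simp only [hcv, if_false, Bool.false_eq_true]
          by_cases hm : v ∈ t
          · have : v ∈ e :: t := by simp [hm]
            rw [if_pos hm, if_pos this, List.idxOf_cons_ne _ (fun hh => hv hh.symm)]
            push_cast; ring_nf
          · have : v ∉ e :: t := by simp [hv, hm]
            rw [if_neg hm, if_neg this]
    · simp only [hc, if_false, Bool.false_eq_true]
      rw [ih]
      by_cases hv : v = e
      · subst hv
        simp only [PySem.Dict.contains_insert, BEq.rfl, Bool.true_or, if_true]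
        rw [PySem.Dict.get?_insert_self, if_neg hc, if_pos (by simp), List.idxOf_cons_self]
        simp
      · have hci : (d.insert e s).contains v = d.contains v := by
          simp [PySem.Dict.contains_insert, hv]
        have hgi : (d.insert e s).get? v = d.get? v := PySem.Dict.get?_insert_of_ne _ _ hv
        rw [hci, hgi]
        by_cases hcv : d.contains v
        · simp [hcv]
        · simp only [hcv, if_false, Bool.false_eq_true]
          by_cases hm : v ∈ t
          · have : v ∈ e :: t := by simp [hm]
            rw [if_pos hm, if_pos this, List.idxOf_cons_ne _ (fun hh => hv hh.symm)]
            push_cast; ring_nf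
          · have : v ∉ e :: t := by simp [hv, hm]
            rw [if_neg hm, if_neg this]

theorem pvRank_get? (ss : List Int) (v : Int) :
    (pvRank ss).get? v = if v ∈ ss then some ((ss.idxOf v : Int)) else none := by
  unfold pvRank
  rw [pvRankLoop_get?]
  simp [PySem.Dict.contains_empty, PySem.Dict.get?_empty]

theorem pvRank_contains (ss : List Int) (v : Int) :
    (pvRank ss).contains v = decide (v ∈ ss) := by
  rw [PySem.Dict.contains_eq_isSome_get?, pvRank_get?]
  by_cases hm : v ∈ ss <;> simp [hm]

theorem pvRank_getD {ss : List Int} {v : Int} (h : v ∈ ss) :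
    (pvRank ss).getD v 0 = (ss.idxOf v : Int) := by
  apply PySem.Dict.getD_of_get?_eq_some
  rw [pvRank_get?, if_pos h]

theorem pvK_injective (ss : List Int) : Function.Injective (pvK (pvRank ss)) := by
  intro a b h
  unfold pvK at h
  have h' := toLex.injective h
  rw [Prod.mk.injEq] at h'
  by_cases ha : (pvRank ss).contains a <;> by_cases hb : (pvRank ss).contains b
  · have hma : a ∈ ss := by
      have := pvRank_contains ss a; rw [ha] at this; exact of_decide_eq_true this.symm
    have hmb : b ∈ ss := by
      have := pvRank_contains ss b; rw [hb] at this; exact of_decide_eq_true this.symm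
    have h2 := h'.2
    rw [if_pos ha, if_pos hb, pvRank_getD hma, pvRank_getD hmb] at h2
    have hidx : ss.idxOf a = ss.idxOf b := by exact_mod_cast h2
    calc a = ss[ss.idxOf a]'(List.idxOf_lt_length_of_mem hma) := (List.getElem_idxOf _).symm
      _ = ss[ss.idxOf b]'(List.idxOf_lt_length_of_mem hmb) := by congr 1
      _ = b := List.getElem_idxOf _
  · exfalso; have h1 := h'.1; rw [if_pos ha, if_neg hb] at h1; norm_num at h1
  · exfalso; have h1 := h'.1; rw [if_neg ha, if_pos hb] at h1; norm_num at h1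
  · have h2 := h'.2; rwa [if_neg ha, if_neg hb] at h2

theorem pvAlt_eq_sorted (fs ss : List Int) :
    speacial_sort_alt fs ss = PySem.List.sorted fs (pvK (pvRank ss)) false := by
  unfold speacial_sort_alt pvK pvRank
  rw [PySem.List.sorted2, PySem.List.sorted_eq_foldl_insertBy]
  simp only [if_neg (by simp : ¬ false = true)]
  congr 1
  funext acc x
  congr 1
  funext a b
  set d := (PySem.List.enumerate ss).foldl
      (fun (d : PySem.Dict Int Int) p => if d.contains p.2 then d else d.insert p.2 p.1)
      PySem.Dict.empty with hd
  simp only [Prod.Lex.toLex_lt_toLex]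
  rcases lt_trichotomy (if d.contains a then (0:Int) else 1)
      (if d.contains b then (0:Int) else 1) with h | h | h
  · simp [h, not_lt.mpr (le_of_lt h)]
  · simp [h]
  · simp [not_lt.mpr (le_of_lt h), h, ne_of_gt h]

theorem pvFlat_mem {h : Int → Int} {us : List Int} {x : Int}
    (hx : x ∈ us.flatMap (fun e => List.replicate (h e).toNat e)) : x ∈ us := by
  rcases List.mem_flatMap.1 hx with ⟨e, he, hxe⟩
  rwa [List.eq_of_mem_replicate hxe]

theorem pvFlat_count (h : Int → Int) (us : List Int) (hnd : us.Nodup) (v : Int) :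
    (us.flatMap (fun e => List.replicate (h e).toNat e)).count v
    = if v ∈ us then (h v).toNat else 0 := by
  induction us with
  | nil => simp
  | cons e t ih =>
    rw [List.nodup_cons] at hnd
    rw [List.flatMap_cons, List.count_append, ih hnd.2, List.count_replicate]
    by_cases hv : v = e
    · subst hv; simp [hnd.1]
    · simp [hv, Ne.symm hv]

theorem pvFlat_pairwise {R : Int → Int → Prop} {h : Int → Int} {us : List Int}
    (hrefl : ∀ a ∈ us, R a a) (hp : us.Pairwise R) :
    (us.flatMap (fun e => List.replicate (h e).toNat e)).Pairwise R := by
  induction us with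
  | nil => exact List.Pairwise.nil
  | cons e t ih =>
    rw [List.pairwise_cons] at hp
    rw [List.flatMap_cons]
    refine (List.pairwise_append).2 ⟨?_, ?_, ?_⟩
    · exact (List.pairwise_replicate).2 (Or.inr (hrefl e (by simp)))
    · exact ih (fun a ha => hrefl a (by simp [ha])) hp.2
    · intro x hx y hy
      rw [List.eq_of_mem_replicate hx]
      exact hp.1 y (pvFlat_mem hy)

-- ===== VERDICT (by name: the statement is the Claim_ definition above) =====
theorem speacial_sort_spec : Claim_equal_speacial_sort := by
  intro fs ss _
  unfold Spec_speacial_sort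
  rw [pvAlt_eq_sorted]
  show speacial_sort fs ss = _
  simp only [speacial_sort]
  rw [pvLoopA]
  simp only []
  rw [PySem.List.foldl_append_eq_flatMap]
  -- name the pieces
  set f2 := ss.foldl (fun d e => d.insert e 0) (PySem.Dict.counter fs) with hf2
  set remaining := PySem.List.sorted (f2.keys.filter (fun x => decide (f2.getD x 0 ≠ 0))) (fun x => x) false with hrem
  have hgfin : ∀ v, f2.getD v 0 = if v ∈ ss then 0 else (fs.count v : Int) := by
    intro v; rw [hf2, pvZeroFold_getD, PySem.Dict.getD_counter]
  have hkeys : f2.keys = PySem.Set.update (PySem.Set.ofList fs) ss := by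
    rw [hf2, PySem.Dict.keys_foldl_insert ss (fun _ _ => (0:Int)), PySem.Dict.keys_counter]
  have hkeys_nodup : f2.keys.Nodup := by
    rw [hf2]; exact PySem.Dict.nodup_keys_foldl_insert ss (fun _ _ => (0:Int)) _ (PySem.Dict.nodup_keys_counter fs)
  have hrem_mem : ∀ x, x ∈ remaining ↔ x ∈ fs ∧ x ∉ ss := by
    intro x
    rw [hrem, PySem.List.mem_sorted, List.mem_filter, hkeys]
    simp only [PySem.Set.mem_update, PySem.Set.mem_ofList, decide_eq_true_eq, hgfin x]
    by_cases hx : x ∈ ss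
    · simp [hx]
    · simp only [hx, or_false, not_false_iff, and_true]
      refine ⟨fun h => h.1, fun hm => ⟨hm, ?_⟩⟩
      exact Int.natCast_ne_zero.mpr (List.count_pos_iff.2 hm).ne'
  have hrem_nodup : remaining.Nodup := by
    rw [hrem]
    exact ((PySem.List.sorted_perm _ _ _).nodup_iff).2 (hkeys_nodup.filter _)
  have hrem_pw : remaining.Pairwise (fun a b => a < b) := by
    have h1 : remaining.Pairwise (fun a b : Int => a ≤ b) := by
      rw [hrem]
      exact PySem.List.sorted_pairwise (f2.keys.filter (fun x => decide (f2.getD x 0 ≠ 0))) (fun x => x)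
    exact (h1.and hrem_nodup).imp (fun h => lt_of_le_of_ne h.1 h.2)
  -- counts: A's output is a permutation of first_array
  have hg0 : (fun v => (PySem.Dict.counter fs).getD v 0) = (fun v => (fs.count v : Int)) := by
    funext v; exact PySem.Dict.getD_counter fs v
  have hcount : ∀ v : Int,
      ([] ++ pvGrp (fun v => (PySem.Dict.counter fs).getD v 0) ss
        ++ remaining.flatMap (fun e => List.replicate (f2.getD e 0).toNat e)).count v = fs.count v := by
    intro v
    rw [List.nil_append, List.count_append, pvGrp_count,
      pvFlat_count _ _ hrem_nodup]
    simp only [PySem.Dict.getD_counter, Int.toNat_natCast]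
    by_cases hv : v ∈ ss
    · have : v ∉ remaining := fun hr => ((hrem_mem v).1 hr).2 hv
      simp [hv, this]
    · by_cases hm : v ∈ fs
      · have : v ∈ remaining := (hrem_mem v).2 ⟨hm, hv⟩
        simp [hv, this, hgfin v, Int.toNat_natCast]
      · have : v ∉ remaining := fun hr => hm ((hrem_mem v).1 hr).1
        simp [hv, this, List.count_eq_zero.2 hm]
  have hperm : ([] ++ pvGrp (fun v => (PySem.Dict.counter fs).getD v 0) ss
        ++ remaining.flatMap (fun e => List.replicate (f2.getD e 0).toNat e)).Perm
      (PySem.List.sorted fs (pvK (pvRank ss)) false) := by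
    refine (List.perm_iff_count.2 ?_).trans (PySem.List.sorted_perm fs (pvK (pvRank ss)) false).symm
    intro a; exact hcount a
  -- key facts
  have hKmemss : ∀ a ∈ ss, pvK (pvRank ss) a = toLex ((0:Int), (ss.idxOf a : Int)) := by
    intro a ha
    have hc : (pvRank ss).contains a = true := by rw [pvRank_contains]; exact decide_eq_true ha
    rw [pvK, if_pos hc, if_pos hc, pvRank_getD ha]
  have hKnotss : ∀ a, a ∉ ss → pvK (pvRank ss) a = toLex ((1:Int), a) := by
    intro a ha
    have hc : ¬ (pvRank ss).contains a = true := by rw [pvRank_contains]; simpa using ha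
    rw [pvK, if_neg hc, if_neg hc]
  -- pairwise on A's output
  have hpw : ([] ++ pvGrp (fun v => (PySem.Dict.counter fs).getD v 0) ss
        ++ remaining.flatMap (fun e => List.replicate (f2.getD e 0).toNat e)).Pairwise
      (fun a b => pvK (pvRank ss) a ≤ pvK (pvRank ss) b) := by
    rw [List.nil_append]
    refine (List.pairwise_append).2 ⟨?_, ?_, ?_⟩
    · rw [pvGrp_eq_pvGrp_pvFD]
      refine pvGrp_pairwise (fun a _ => le_refl _) ?_
      refine (pvFD_pairwise_idxOf ss).imp_of_mem ?_
      intro a b ha hb hlt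
      have ha' := (pvFD_mem ss a).1 ha
      have hb' := (pvFD_mem ss b).1 hb
      rw [hKmemss a ha', hKmemss b hb', Prod.Lex.toLex_le_toLex]
      right
      refine ⟨rfl, ?_⟩
      show ((ss.idxOf a : Int)) ≤ (ss.idxOf b : Int)
      exact_mod_cast le_of_lt hlt
    · refine pvFlat_pairwise (fun a _ => le_refl _) ?_
      refine hrem_pw.imp_of_mem ?_
      intro a b ha hb hlt
      rw [hKnotss a ((hrem_mem a).1 ha).2, hKnotss b ((hrem_mem b).1 hb).2, Prod.Lex.toLex_le_toLex]
      right
      exact ⟨rfl, show a ≤ b from le_of_lt hlt⟩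
    · intro x hx y hy
      have hxss : x ∈ ss := pvGrp_mem hx
      have hyss : y ∉ ss := ((hrem_mem y).1 (pvFlat_mem hy)).2
      rw [hKmemss x hxss, hKnotss y hyss, Prod.Lex.toLex_le_toLex]
      left
      show (0:Int) < 1
      norm_num
  exact PySem.List.eq_of_perm_of_pairwise_le_of_injective (pvK (pvRank ss)) (pvK_injective ss)
    hperm hpw (PySem.List.sorted_pairwise fs (pvK (pvRank ss)))
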